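-- pv_equiv track=rewrite | github.com/vosslab/bkchem | tests/test_render_layout_parity.py | _count_by_kind
-- ===== SOURCE A (Python) =====
-- def _count_by_kind(payload):
-- 	counts = {
-- 		"line": 0,
-- 		"text": 0,
-- 		"path": 0,
-- 		"polygon": 0,
-- 	}
-- 	for entry in payload:
-- 		kind = entry.get("kind")
-- 		if kind in counts:
-- 			counts[kind] += 1
-- 	return counts
-- ===== SOURCE B (Python) =====
-- def _count_by_kind(payload):
-- 	# One independent filtered scan per schema key; no mutable counting table.
-- 	return {
-- 		kind: sum(1 for entry in payload if entry.get("kind") == kind)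
-- 		for kind in ("line", "text", "path", "polygon")
-- 	}
-- ===== Notes on version B (the rewrite author's own statement) =====
-- stated objective: alternative
-- what changed: Inverts the loop structure: instead of one pass over payload updating a mutable four-key table, B makes four independent filtered-count passes, one per schema key, building the result dict directly with no counting table or membership test.
import Mathlib
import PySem

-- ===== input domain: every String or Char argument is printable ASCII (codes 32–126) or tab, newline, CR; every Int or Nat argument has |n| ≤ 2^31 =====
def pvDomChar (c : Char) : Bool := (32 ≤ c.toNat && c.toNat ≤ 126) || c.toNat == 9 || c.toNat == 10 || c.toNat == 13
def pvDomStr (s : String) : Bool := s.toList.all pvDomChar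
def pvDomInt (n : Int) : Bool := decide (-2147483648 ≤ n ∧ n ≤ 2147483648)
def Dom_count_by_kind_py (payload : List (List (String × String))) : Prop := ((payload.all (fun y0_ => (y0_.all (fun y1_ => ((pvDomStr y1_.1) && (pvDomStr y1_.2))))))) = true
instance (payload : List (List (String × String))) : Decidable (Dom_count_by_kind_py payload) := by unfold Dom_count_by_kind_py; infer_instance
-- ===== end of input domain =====

-- B inverts the loop structure: instead of one pass updating a mutable four-key
-- table, it makes four independent filtered-count passes, one per schema key
-- (objective: alternative; same order of cost).

-- ===== PORT A =====
-- entry.get("kind") for an entry given as an association list (dict semantics: last write wins)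
def pvKindOf (e : List (String × String)) : Option String :=
  (PySem.Dict.ofList e).get? "kind"

-- loop body of A: if kind in counts: counts[kind] += 1
def pvStepA (d : PySem.Dict String Int) (e : List (String × String)) : PySem.Dict String Int :=
  match pvKindOf e with
  | some k => if d.contains k then d.modify k 0 (· + 1) else d
  | none => d

def count_by_kind_py (payload : List (List (String × String))) : List (String × Int) :=
  let counts : PySem.Dict String Int :=
    PySem.Dict.ofList [("line", 0), ("text", 0), ("path", 0), ("polygon", 0)]
  (payload.foldl pvStepA counts).items

-- ===== PORT B =====
-- {kind: sum(1 for entry in payload if entry.get("kind") == kind) for kind in (...)}: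
-- the 0/1-sum over the filtered generator is List.countP of the filter predicate
def count_by_kind_py_alt (payload : List (List (String × String))) : List (String × Int) :=
  ["line", "text", "path", "polygon"].map
    (fun kind => (kind, (payload.countP (fun entry => pvKindOf entry == some kind) : Int)))

-- ===== PRECONDITION & SPEC =====
def Spec_count_by_kind_py (payload : List (List (String × String))) (out : List (String × Int)) : Prop := out = count_by_kind_py_alt payload
instance (payload : List (List (String × String))) (out : List (String × Int)) : Decidable (Spec_count_by_kind_py payload out) := by unfold Spec_count_by_kind_py; infer_instance

-- ===== CLAIM (what is proved, stated in full; the proofs are below) =====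
def Claim_equal_count_by_kind_py : Prop := ∀ (payload : List (List (String × String))), Dom_count_by_kind_py payload → Spec_count_by_kind_py payload (count_by_kind_py payload)

-- ===== LEMMAS AND PROOFS =====

def pvK4 : List String := ["line", "text", "path", "polygon"]

theorem pv_keys_step (d : PySem.Dict String Int) (e : List (String × String)) :
    (pvStepA d e).keys = d.keys := by
  unfold pvStepA
  cases pvKindOf e with
  | none => rfl
  | some k =>
    simp only []
    by_cases h : d.contains k = true
    · simp [h, PySem.Dict.keys_modify, PySem.Dict.keys_insert_of_contains _ _ h]
    · simp [h]

theorem pv_keys_fold (l : List (List (String × String))) (d : PySem.Dict String Int) :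
    (l.foldl pvStepA d).keys = d.keys := by
  induction l generalizing d with
  | nil => rfl
  | cons e t ih => simp [List.foldl_cons, ih, pv_keys_step]

theorem pv_getD_step (d : PySem.Dict String Int) (e : List (String × String)) (k' : String)
    (hk' : k' ∈ d.keys) :
    (pvStepA d e).getD k' 0 =
      if pvKindOf e = some k' then d.getD k' 0 + 1 else d.getD k' 0 := by
  unfold pvStepA
  cases he : pvKindOf e with
  | none => simp
  | some k =>
    simp only [Option.some.injEq]
    by_cases hkk : k = k'
    · subst hkk
      have hc : d.contains k = true := (PySem.Dict.contains_iff_mem_keys d k).mpr hk'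
      simp [hc, PySem.Dict.getD_modify_self]
    · by_cases hc : d.contains k = true
      · simp [hc, PySem.Dict.getD_modify_of_ne d 0 (· + 1) (Ne.symm hkk), hkk]
      · simp [hc, hkk]

theorem pv_getD_fold (l : List (List (String × String))) (d : PySem.Dict String Int)
    (k' : String) (hk' : k' ∈ d.keys) :
    (l.foldl pvStepA d).getD k' 0 =
      d.getD k' 0 + (l.countP (fun e => pvKindOf e == some k') : Int) := by
  induction l generalizing d with
  | nil => simp
  | cons e t ih =>
    have hk2 : k' ∈ (pvStepA d e).keys := by rw [pv_keys_step]; exact hk'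
    rw [List.foldl_cons, ih _ hk2, pv_getD_step d e k' hk']
    simp only [List.countP_cons]
    by_cases he : pvKindOf e = some k'
    · simp [he]; ring
    · simp [he]

theorem count_by_kind_py_spec' (payload : List (List (String × String))) :
    count_by_kind_py payload = count_by_kind_py_alt payload := by
  unfold count_by_kind_py count_by_kind_py_alt
  set d0 : PySem.Dict String Int :=
    PySem.Dict.ofList [("line", 0), ("text", 0), ("path", 0), ("polygon", 0)] with hd0
  have hkeys : (payload.foldl pvStepA d0).keys = pvK4 := by
    rw [pv_keys_fold]; decide
  have hnd : (payload.foldl pvStepA d0).keys.Nodup := by rw [hkeys]; decide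
  rw [PySem.Dict.items_eq_map_keys _ hnd (0 : Int), hkeys]
  apply List.map_congr_left
  intro k hk
  have hk0 : k ∈ d0.keys := by
    have hd0k : d0.keys = pvK4 := by decide
    rw [hd0k]; exact hk
  rw [pv_getD_fold payload d0 k hk0]
  have hz : d0.getD k 0 = 0 := by fin_cases hk <;> decide
  rw [hz, zero_add]

-- ===== VERDICT (by name: the statement is the Claim_ definition above) =====
theorem count_by_kind_py_spec : Claim_equal_count_by_kind_py := by
  intro payload _
  exact count_by_kind_py_spec' payload
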